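-- pv_equiv track=rewrite | github.com/theonewolf/aoc2024 | 7/7.py | is_satisfiable
-- ===== SOURCE A (Python) =====
-- from operator import add, mul
--
-- def is_satisfiable(equation):
--     result = equation[0]
--     values = equation[1:]
--     ops = [add, mul]
--
--     for operator in range(2**(len(values)-1)):
--         accumulator = values[0]
--         for i in range(len(values) - 1):
--             accumulator = ops[(operator >> i) & 1](accumulator, values[i+1])
--         if accumulator == result:
--             return True
--     return False
-- ===== SOURCE B (Python) =====
-- def is_satisfiable(equation):
--     result = equation[0]
--     values = equation[1:]
--     reachable = {values[0]}
--     for v in values[1:]: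
--         reachable = {a + v for a in reachable} | {a * v for a in reachable}
--     return result in reachable
-- ===== Notes on version B (the rewrite author's own statement) =====
-- stated objective: alternative
-- what changed: Replaces A's enumeration of all 2^(n-1) operator masks (re-evaluating the whole chain for each mask) by a single forward pass maintaining the deduplicated set of reachable accumulator values; measured 2.87x at n=16 but on random large values dedup rarely fires, so speed is not claimed.
-- outside the precondition, e.g. on is_satisfiable([0]): A raises TypeError, B raises IndexError
import Mathlib
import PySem

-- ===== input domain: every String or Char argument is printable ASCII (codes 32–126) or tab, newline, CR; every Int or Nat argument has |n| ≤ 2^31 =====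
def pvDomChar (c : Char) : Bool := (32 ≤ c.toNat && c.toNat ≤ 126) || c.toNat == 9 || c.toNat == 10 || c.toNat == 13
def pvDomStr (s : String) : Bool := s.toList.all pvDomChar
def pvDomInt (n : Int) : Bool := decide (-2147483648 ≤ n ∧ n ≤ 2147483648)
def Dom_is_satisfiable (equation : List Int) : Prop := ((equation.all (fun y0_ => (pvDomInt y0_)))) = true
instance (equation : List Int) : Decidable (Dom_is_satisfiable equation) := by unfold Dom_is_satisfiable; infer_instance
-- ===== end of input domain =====

-- B replaces A's enumeration of all 2^(n-1) operator masks by a forward set-DP over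
-- deduplicated reachable values (objective: alternative; return value only, no mutation).

-- ===== PORT A =====
-- literal transliteration of Source A: equation[0] / values[0] are IndexError outside Pre_
-- (pyGetD's default is never the value used there); range(2**(len(values)-1)) raises
-- (TypeError) when len(values) = 0, also outside Pre_. The nonnegative-int mask loop
-- 'for operator in range(2**k)' is ported as List.range (2^k) over Nat (exact: the
-- masks are exactly 0,…,2^k-1); the early 'return True' loop is `List.any`.
def is_satisfiable (equation : List Int) : Bool :=
  let result := PySem.List.pyGetD equation 0 0
  let values := PySem.List.slice equation (some 1) none
  (List.range (2 ^ (values.length - 1))).any (fun operator =>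
    let accumulator := (List.range (values.length - 1)).foldl
      (fun accumulator i =>
        -- ops[(operator >> i) & 1]: bit 0 = add, bit 1 = mul
        if (operator >>> i) % 2 == 0 then accumulator + PySem.List.pyGetD values ((i : Int) + 1) 0
        else accumulator * PySem.List.pyGetD values ((i : Int) + 1) 0)
      (PySem.List.pyGetD values 0 0)
    accumulator == result)

-- ===== PORT B =====
-- literal transliteration of Source B: the two set comprehensions are Set.ofList of maps
-- over the current set (only set contents matter downstream: union, then membership).
def is_satisfiable_alt (equation : List Int) : Bool :=
  let result := PySem.List.pyGetD equation 0 0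
  let values := PySem.List.slice equation (some 1) none
  let reachable : PySem.Set Int :=
    (PySem.List.slice values (some 1) none).foldl
      (fun reachable v =>
        PySem.Set.union (PySem.Set.ofList (reachable.map (· + v)))
                        (PySem.Set.ofList (reachable.map (· * v))))
      (PySem.Set.ofList [PySem.List.pyGetD values 0 0])
  PySem.Set.contains reachable result

-- ===== PRECONDITION & SPEC =====
-- A raises (IndexError on equation[0] or values[0], TypeError on range(2**(-1)))
-- exactly when equation has fewer than 2 elements; B raises there too.
def Pre_is_satisfiable (equation : List Int) : Prop := 2 ≤ equation.length
instance (equation : List Int) : Decidable (Pre_is_satisfiable equation) := by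
  unfold Pre_is_satisfiable; infer_instance

def pvWitness_is_satisfiable : List Int := [6, 2, 3]

def Spec_is_satisfiable (equation : List Int) (out : Bool) : Prop := out = is_satisfiable_alt equation
instance (equation : List Int) (out : Bool) : Decidable (Spec_is_satisfiable equation out) := by unfold Spec_is_satisfiable; infer_instance

-- ===== CLAIM (what is proved, stated in full; the proofs are below) =====
def Claim_equal_is_satisfiable : Prop := ∀ (equation : List Int), Dom_is_satisfiable equation → Pre_is_satisfiable equation → Spec_is_satisfiable equation (is_satisfiable equation)

-- ===== LEMMAS AND PROOFS =====

-- reference spec: can `t` be reached from `acc` by folding +/* through `vs` left to right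
def canReach (acc : Int) (vs : List Int) (t : Int) : Bool :=
  match vs with
  | [] => acc == t
  | v :: tl => canReach (acc + v) tl t || canReach (acc * v) tl t

-- A's inner accumulator, with the mask consumed bit by bit
def evalBits (o : Nat) (acc : Int) (vs : List Int) : Int :=
  match vs with
  | [] => acc
  | v :: tl => evalBits (o / 2) (if o % 2 == 0 then acc + v else acc * v) tl

-- A's indexed inner fold over values = v0 :: rest equals evalBits on rest
theorem foldl_eq_evalBits (o : Nat) (w acc : Int) (rest : List Int) :
    (List.range rest.length).foldl
      (fun accumulator i =>
        if (o >>> i) % 2 == 0 then accumulator + PySem.List.pyGetD (w :: rest) ((i : Int) + 1) 0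
        else accumulator * PySem.List.pyGetD (w :: rest) ((i : Int) + 1) 0)
      acc = evalBits o acc rest := by
  induction rest generalizing w acc o with
  | nil => simp [evalBits]
  | cons v tl ih =>
    rw [show (v :: tl).length = tl.length + 1 from rfl, List.range_succ_eq_map]
    simp only [List.foldl_cons, List.foldl_map]
    rw [evalBits]
    have h0 : PySem.List.pyGetD (w :: v :: tl) ((0 : Nat) + 1) 0 = v := by
      norm_num [PySem.List.pyGetD_ofNat']
    rw [Nat.shiftRight_zero, h0]
    rw [← ih (o / 2) v (if o % 2 == 0 then acc + v else acc * v)]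
    refine List.foldl_ext _ _ _ ?_
    intro a i hi
    have hsh : o >>> (i + 1) = (o / 2) >>> i := by
      rw [Nat.add_comm, Nat.shiftRight_add, Nat.shiftRight_one]
    have hidx : PySem.List.pyGetD (w :: v :: tl) (((i + 1 : Nat) : Int) + 1) 0
        = PySem.List.pyGetD (v :: tl) ((i : Int) + 1) 0 := by
      have e1 : (((i + 1 : Nat) : Int) + 1) = ((i + 2 : Nat) : Int) := by push_cast; ring
      have e2 : ((i : Int) + 1) = ((i + 1 : Nat) : Int) := by push_cast; ring
      rw [e1, e2, PySem.List.pyGetD_natCast, PySem.List.pyGetD_natCast]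
      rfl
    rw [hsh, hidx]

-- A's mask enumeration computes canReach
theorem any_range_evalBits (vs : List Int) (acc t : Int) :
    ((List.range (2 ^ vs.length)).any (fun o => evalBits o acc vs == t))
      = canReach acc vs t := by
  induction vs generalizing acc with
  | nil => simp [evalBits, canReach]
  | cons v tl ih =>
    rw [canReach, ← ih (acc + v), ← ih (acc * v), Bool.eq_iff_iff]
    simp only [Bool.or_eq_true, List.any_eq_true, List.mem_range]
    constructor
    · rintro ⟨o, ho, hev⟩
      rw [evalBits] at hev
      have ho' : o < 2 ^ (tl.length + 1) := by simpa using ho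
      have hdiv : o / 2 < 2 ^ tl.length := by
        have : o / 2 < 2 ^ (tl.length + 1) / 2 :=
          Nat.div_lt_div_of_lt_of_dvd ⟨2 ^ tl.length, by ring⟩ ho'
        simpa [Nat.pow_succ, Nat.mul_div_cancel_left] using this
      rcases Nat.mod_two_eq_zero_or_one o with h2 | h2
      · rw [h2] at hev; exact Or.inl ⟨o / 2, hdiv, by simpa using hev⟩
      · rw [h2] at hev; exact Or.inr ⟨o / 2, hdiv, by simpa using hev⟩
    · rintro (⟨o, ho, hev⟩ | ⟨o, ho, hev⟩)
      · refine ⟨2 * o, by simp only [List.length_cons, Nat.pow_succ]; omega, ?_⟩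
        rw [evalBits]
        simpa [Nat.mul_div_cancel_left, Nat.mul_mod_right] using hev
      · refine ⟨2 * o + 1, by simp only [List.length_cons, Nat.pow_succ]; omega, ?_⟩
        rw [evalBits]
        have hd : (2 * o + 1) / 2 = o := by omega
        have hm : (2 * o + 1) % 2 = 1 := by omega
        simpa [hd, hm] using hev

-- B's set fold: membership = reachability from some element of the current set
theorem mem_foldl_sets (vs : List Int) (s : PySem.Set Int) (t : Int) :
    (t ∈ vs.foldl
      (fun reachable v =>
        PySem.Set.union (PySem.Set.ofList (reachable.map (· + v)))
                        (PySem.Set.ofList (reachable.map (· * v)))) s)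
      ↔ ∃ a ∈ s, canReach a vs t = true := by
  induction vs generalizing s with
  | nil =>
    simp only [List.foldl_nil, canReach]
    constructor
    · intro h; exact ⟨t, h, by simp⟩
    · rintro ⟨a, ha, hb⟩; rw [beq_iff_eq] at hb; rwa [hb] at ha
  | cons v tl ih =>
    rw [List.foldl_cons, ih]
    constructor
    · rintro ⟨a, ha, hr⟩
      rw [PySem.Set.mem_union, PySem.Set.mem_ofList, PySem.Set.mem_ofList] at ha
      rcases ha with ha | ha <;> obtain ⟨b, hb, rfl⟩ := List.mem_map.mp ha
      · exact ⟨b, hb, by rw [canReach, hr]; simp⟩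
      · exact ⟨b, hb, by rw [canReach, hr]; simp⟩
    · rintro ⟨b, hb, hr⟩
      rw [canReach, Bool.or_eq_true] at hr
      rcases hr with hr | hr
      · refine ⟨b + v, ?_, hr⟩
        rw [PySem.Set.mem_union, PySem.Set.mem_ofList]
        exact Or.inl (List.mem_map_of_mem hb)
      · refine ⟨b * v, ?_, hr⟩
        rw [PySem.Set.mem_union, PySem.Set.mem_ofList, PySem.Set.mem_ofList]
        exact Or.inr (List.mem_map_of_mem hb)

-- ===== VERDICT (by name: the statement is the Claim_ definition above) =====
theorem is_satisfiable_spec : Claim_equal_is_satisfiable := by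
  intro equation _hdom hpre
  unfold Spec_is_satisfiable
  obtain ⟨r, v0, rest, rfl⟩ : ∃ r v0 rest, equation = r :: v0 :: rest := by
    match equation, hpre with
    | r :: v0 :: rest, _ => exact ⟨r, v0, rest, rfl⟩
  unfold is_satisfiable is_satisfiable_alt
  simp only [PySem.List.slice_from_one, List.tail_cons, PySem.List.pyGetD_zero_cons,
    List.length_cons, Nat.add_sub_cancel]
  simp only [foldl_eq_evalBits]
  rw [any_range_evalBits, Bool.eq_iff_iff, PySem.Set.contains_iff, mem_foldl_sets]
  constructor
  · intro h
    exact ⟨v0, by rw [PySem.Set.mem_ofList]; exact List.mem_singleton.mpr rfl, h⟩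
  · rintro ⟨a, ha, hr⟩
    rw [PySem.Set.mem_ofList, List.mem_singleton] at ha
    subst ha
    exact hr
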